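-- pv_equiv track=rewrite | github.com/paul172v/python-100-days-of-code | day8/love_score.py | calc_truelove
-- ===== SOURCE A (Python) =====
-- def calc_truelove(arr1, arr2):
--     true_score = 0
--     love_score = 0
--
--     for letter in arr1:
--         if letter == 't':
--             true_score += 1
--         if letter == 'r':
--             true_score += 1
--         if letter == 'u':
--             true_score += 1
--         if letter == 'e':
--             true_score += 1
--         if letter == 'l':
--             love_score += 1
--         if letter == 'o':
--             love_score += 1
--         if letter == 'v':
--             love_score += 1
--         if letter == 'e':
--             love_score += 1
--
--     for letter in arr2:
--         if letter == 't':
--             true_score += 1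
--         if letter == 'r':
--             true_score += 1
--         if letter == 'u':
--             true_score += 1
--         if letter == 'e':
--             true_score += 1
--         if letter == 'l':
--             love_score += 1
--         if letter == 'o':
--             love_score += 1
--         if letter == 'v':
--             love_score += 1
--         if letter == 'e':
--             love_score += 1
--
--     return(f'{true_score}{love_score}')
-- ===== SOURCE B (Python) =====
-- def calc_truelove(arr1, arr2):
--     both = arr1 + arr2
--     true_score = sum(both.count(ch) for ch in 'true')
--     love_score = sum(both.count(ch) for ch in 'love')
--     return f'{true_score}{love_score}'
-- ===== Notes on version B (the rewrite author's own statement) =====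
-- stated objective: idiomatic
-- what changed: Replaces the per-element eight-branch if-accumulation over two loops with a concatenate-then-count decomposition: one pass per target letter via list.count over arr1+arr2, summed per word.
import Mathlib
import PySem

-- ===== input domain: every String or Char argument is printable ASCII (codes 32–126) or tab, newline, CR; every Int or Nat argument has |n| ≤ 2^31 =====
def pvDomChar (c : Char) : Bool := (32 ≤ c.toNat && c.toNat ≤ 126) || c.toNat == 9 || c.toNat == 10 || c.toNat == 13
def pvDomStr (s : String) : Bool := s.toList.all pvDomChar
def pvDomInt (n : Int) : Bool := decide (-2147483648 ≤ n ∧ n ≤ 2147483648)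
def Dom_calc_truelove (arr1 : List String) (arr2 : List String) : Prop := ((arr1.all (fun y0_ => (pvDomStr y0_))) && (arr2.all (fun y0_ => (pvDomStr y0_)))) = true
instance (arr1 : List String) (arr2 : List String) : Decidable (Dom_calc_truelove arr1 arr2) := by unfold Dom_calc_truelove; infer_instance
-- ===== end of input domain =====

-- B replaces A's per-element eight-branch accumulation with a concatenate-then-count-per-letter decomposition (idiomatic, same cost).


-- ===== PORT A =====
-- one iteration of A's loop body: the eight independent ifs, in source order
def pvStepA (st : Int × Int) (letter : String) : Int × Int :=
  let t := st.1
  let l := st.2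
  let t := if letter == "t" then t + 1 else t
  let t := if letter == "r" then t + 1 else t
  let t := if letter == "u" then t + 1 else t
  let t := if letter == "e" then t + 1 else t
  let l := if letter == "l" then l + 1 else l
  let l := if letter == "o" then l + 1 else l
  let l := if letter == "v" then l + 1 else l
  let l := if letter == "e" then l + 1 else l
  (t, l)

def calc_truelove (arr1 : List String) (arr2 : List String) : String :=
  let s1 := arr1.foldl pvStepA (0, 0)
  let s2 := arr2.foldl pvStepA s1
  String.ofList (PySem.Int.toChars s2.1 ++ PySem.Int.toChars s2.2)   -- f'{true_score}{love_score}'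

-- ===== PORT B =====
def calc_truelove_alt (arr1 : List String) (arr2 : List String) : String :=
  let both := arr1 ++ arr2
  let true_score : Int := ((["t", "r", "u", "e"].map (fun ch => (PySem.List.count both ch : Int))).sum)
  let love_score : Int := ((["l", "o", "v", "e"].map (fun ch => (PySem.List.count both ch : Int))).sum)
  String.ofList (PySem.Int.toChars true_score ++ PySem.Int.toChars love_score)

-- ===== PRECONDITION & SPEC =====
def Spec_calc_truelove (arr1 : List String) (arr2 : List String) (out : String) : Prop := out = calc_truelove_alt arr1 arr2
instance (arr1 : List String) (arr2 : List String) (out : String) : Decidable (Spec_calc_truelove arr1 arr2 out) := by unfold Spec_calc_truelove; infer_instance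

-- ===== CLAIM (what is proved, stated in full; the proofs are below) =====
def Claim_equal_calc_truelove : Prop := ∀ (arr1 : List String) (arr2 : List String), Dom_calc_truelove arr1 arr2 → Spec_calc_truelove arr1 arr2 (calc_truelove arr1 arr2)

-- ===== LEMMAS AND PROOFS =====

-- A's fold starting from any state adds the per-letter counts of the list to it
lemma foldl_pvStepA (xs : List String) (t l : Int) :
    xs.foldl pvStepA (t, l) =
      (t + (PySem.List.count xs "t" : Int) + PySem.List.count xs "r"
         + PySem.List.count xs "u" + PySem.List.count xs "e",
       l + (PySem.List.count xs "l" : Int) + PySem.List.count xs "o"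
         + PySem.List.count xs "v" + PySem.List.count xs "e") := by
  induction xs generalizing t l with
  | nil => simp [PySem.List.count]
  | cons x xs ih =>
    simp only [List.foldl_cons, pvStepA, ih]
    simp [PySem.List.count, List.count_cons]
    constructor <;> · split_ifs <;> simp_all <;> ring

-- ===== VERDICT (by name: the statement is the Claim_ definition above) =====
theorem calc_truelove_spec : Claim_equal_calc_truelove := by
  intro arr1 arr2 _
  show _ = _
  simp only [calc_truelove, calc_truelove_alt, foldl_pvStepA, List.map, List.sum,
    PySem.List.count, List.count_append]
  congr 2 <;> · congr 1; simp [List.foldr]; ring
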